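-- pv_equiv track=rewrite | github.com/SkyzJrz/kalkulator-kriptografi-tugas | app.py | enigma
-- ===== SOURCE A (Python) =====
-- import string
--
-- ALPHABET = string.ascii_uppercase
--
-- rotor_wiring = "EKMFLGDQVZNTOWYHXUSPAIBRCJ"
--
-- reflector = "YRUHQSLDPXNGOKMIEBFZCWVJAT"
--
-- def enigma(text, start_pos=0):
--     result = ""
--     rotor_pos = start_pos
--
--     for char in text.upper():
--         if char in ALPHABET:
--             shifted = ALPHABET[(ord(char)-65+rotor_pos)%26]
--             step1 = rotor_wiring[ord(shifted)-65]
--             step2 = reflector[ord(step1)-65]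
--             back = ALPHABET[rotor_wiring.index(step2)]
--             final = ALPHABET[(ord(back)-65-rotor_pos)%26]
--             result += final
--             rotor_pos = (rotor_pos + 1) % 26
--     return result
-- ===== SOURCE B (Python) =====
-- import string
--
-- ALPHABET = string.ascii_uppercase
--
-- rotor_wiring = "EKMFLGDQVZNTOWYHXUSPAIBRCJ"
--
-- reflector = "YRUHQSLDPXNGOKMIEBFZCWVJAT"
--
-- def enigma(text, start_pos=0):
--     # Precompute the full 26x26 cipher table (output letter per rotor position
--     # and input letter), pre-rotate its rows by start_pos, then encrypt the
--     # letter stream in chunks of 26 by zipping each chunk against the fixed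
--     # row list -- exploiting the period-26 rotor cycle, with no per-letter
--     # position arithmetic in the main loop.
--     perm = [rotor_wiring.index(reflector[ord(c) - 65]) for c in rotor_wiring]
--     table = ["".join(ALPHABET[(perm[(x + p) % 26] - p) % 26] for x in range(26))
--              for p in range(26)]
--     rows = [table[(start_pos + r) % 26] for r in range(26)]
--     codes = [ord(c) - 65 for c in text.upper() if c in ALPHABET]
--     out = []
--     for k in range(0, len(codes), 26):
--         out.append("".join(row[x] for row, x in zip(rows, codes[k:k+26])))
--     return "".join(out)
-- ===== Notes on version B (the rewrite author's own statement) =====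
-- stated objective: faster
-- what changed: B precomputes the full 26x26 cipher table, pre-rotates its rows by start_pos, and encrypts the letter stream in chunks of 26 by zipping each chunk against that fixed row list (exploiting the period-26 rotor cycle), instead of A's stateful per-letter loop that threads a mutable rotor position and redoes three string lookups plus a linear rotor_wiring.index scan per character.
import Mathlib
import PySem

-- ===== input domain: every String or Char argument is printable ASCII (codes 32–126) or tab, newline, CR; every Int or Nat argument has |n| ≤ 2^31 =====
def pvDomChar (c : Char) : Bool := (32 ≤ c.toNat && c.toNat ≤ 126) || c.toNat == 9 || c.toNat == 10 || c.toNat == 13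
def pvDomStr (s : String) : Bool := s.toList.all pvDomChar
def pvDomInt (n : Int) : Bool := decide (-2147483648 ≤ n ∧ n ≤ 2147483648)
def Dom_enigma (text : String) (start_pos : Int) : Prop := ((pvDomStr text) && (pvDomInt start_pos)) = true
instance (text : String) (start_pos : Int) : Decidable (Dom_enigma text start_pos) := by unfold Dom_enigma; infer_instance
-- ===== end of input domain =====

set_option maxRecDepth 10000

-- B precomputes the full 26x26 cipher table with rows pre-rotated by start_pos and
-- encrypts the letter stream in chunks of 26 zipped against that fixed row list
-- (exploiting the period-26 rotor cycle), instead of A's stateful per-letter loop.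

-- ===== PORT A =====
def alphaE : List Char := "ABCDEFGHIJKLMNOPQRSTUVWXYZ".toList
def wiringE : List Char := "EKMFLGDQVZNTOWYHXUSPAIBRCJ".toList
def reflE : List Char := "YRUHQSLDPXNGOKMIEBFZCWVJAT".toList

-- one iteration of A's for-loop; state = (result, rotor_pos).
-- 'char in ALPHABET' for a single char is exactly list membership; the string
-- indexings ALPHABET[_%26], rotor_wiring[_], reflector[_] always hit an in-range
-- index here (guarded by the membership test and %26), so getD is exact.
def enigmaStep (st : List Char × Int) (c : Char) : List Char × Int :=
  if alphaE.contains c then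
    let shifted := alphaE.getD ((PySem.Int.mod ((c.toNat : Int) - 65 + st.2) 26).toNat) ' '
    let step1 := wiringE.getD (shifted.toNat - 65) ' '
    let step2 := reflE.getD (step1.toNat - 65) ' '
    let back := alphaE.getD ((PySem.List.index? wiringE step2).getD 0) ' '
    let final := alphaE.getD ((PySem.Int.mod ((back.toNat : Int) - 65 - st.2) 26).toNat) ' '
    (st.1 ++ [final], PySem.Int.mod (st.2 + 1) 26)
  else st

def enigma (text : String) (start_pos : Int) : String :=
  String.ofList ((PySem.Chars.upper text.toList).foldl enigmaStep ([], start_pos)).1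

-- ===== PORT B =====
-- perm = [rotor_wiring.index(reflector[ord(c)-65]) for c in rotor_wiring]
def permE : List Int :=
  wiringE.map (fun c => (((PySem.List.index? wiringE (reflE.getD (c.toNat - 65) ' ')).getD 0 : Nat) : Int))

-- table[p] = "".join(ALPHABET[(perm[(x+p)%26]-p)%26] for x in range(26))
def tRowE (p : Nat) : List Char :=
  (List.range 26).map (fun x => alphaE.getD ((PySem.Int.mod (permE.getD ((x + p) % 26) 0 - (p : Int)) 26).toNat) ' ')

def tableE : List (List Char) := (List.range 26).map tRowE

-- rows = [table[(start_pos + r) % 26] for r in range(26)]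
def rowsE (s : Int) : List (List Char) :=
  (List.range 26).map (fun (r : Nat) => tableE.getD ((PySem.Int.mod (s + (r : Int)) 26).toNat) [])

def chunkLookup (p : List Char × Int) : Char := p.1.getD p.2.toNat ' '

-- the 'for k in range(0, len(codes), 26)' loop: consume 26 codes per step,
-- zipping each chunk against the fixed row list
def enigmaChunks (rows : List (List Char)) (ls : List Int) : List Char :=
  if h : ls = [] then [] else
    ((rows.zip (ls.take 26)).map chunkLookup) ++ enigmaChunks rows (ls.drop 26)
termination_by ls.length
decreasing_by
  have : 0 < ls.length := List.length_pos_iff.mpr h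
  simp [List.length_drop]; omega

def enigma_alt (text : String) (start_pos : Int) : String :=
  String.ofList (enigmaChunks (rowsE start_pos)
    (((PySem.Chars.upper text.toList).filter (fun c => alphaE.contains c)).map
      (fun c => (c.toNat : Int) - 65)))

-- ===== PRECONDITION & SPEC =====
def Spec_enigma (text : String) (start_pos : Int) (out : String) : Prop := out = enigma_alt text start_pos
instance (text : String) (start_pos : Int) (out : String) : Decidable (Spec_enigma text start_pos out) := by unfold Spec_enigma; infer_instance

-- ===== CLAIM (what is proved, stated in full; the proofs are below) =====
def Claim_equal_enigma : Prop := ∀ (text : String) (start_pos : Int), Dom_enigma text start_pos → Spec_enigma text start_pos (enigma text start_pos)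

-- ===== LEMMAS AND PROOFS =====

def specCharE (s : Int) (p : Int × Char) : Char :=
  (tableE.getD ((PySem.Int.mod (s + p.1) 26).toNat) []).getD (p.2.toNat - 65) ' '

lemma mod26_emod (a : Int) : PySem.Int.mod a 26 = a % 26 :=
  PySem.Int.mod_eq_emod_of_pos (by norm_num)

-- A's per-letter chain of lookups, as a function of the shifted index x,
-- agrees with B's composite permutation (checked by computation over x < 26).
lemma perm_tab_fin : ∀ x : Fin 26,
    ((alphaE.getD ((PySem.List.index? wiringE
        (reflE.getD ((wiringE.getD ((alphaE.getD x.val ' ').toNat - 65) ' ').toNat - 65) ' ')).getD 0) ' ').toNat : Int) - 65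
      = permE.getD x.val 0
    ∧ 0 ≤ permE.getD x.val 0 ∧ permE.getD x.val 0 < 26 := by
  decide

lemma perm_tab (x : Nat) (hx : x < 26) :
    ((alphaE.getD ((PySem.List.index? wiringE
        (reflE.getD ((wiringE.getD ((alphaE.getD x ' ').toNat - 65) ' ').toNat - 65) ' ')).getD 0) ' ').toNat : Int) - 65
      = permE.getD x 0
    ∧ 0 ≤ permE.getD x 0 ∧ permE.getD x 0 < 26 :=
  perm_tab_fin ⟨x, hx⟩

lemma alpha_bounds : ∀ c ∈ alphaE, 65 ≤ c.toNat ∧ c.toNat ≤ 90 := by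
  have h : alphaE.all (fun c => decide (65 ≤ c.toNat) && decide (c.toNat ≤ 90)) = true := by decide
  intro c hc
  have := List.all_eq_true.mp h c hc
  simp at this
  exact this

lemma getD_map_range {α : Type} (f : Nat → α) (d : α) (j : Nat) (hj : j < 26) :
    ((List.range 26).map f).getD j d = f j := by
  rw [List.getD_eq_getElem?_getD, List.getElem?_map, List.getElem?_range hj]; rfl

lemma tableE_getD (p : Nat) (hp : p < 26) : tableE.getD p [] = tRowE p := by
  unfold tableE; exact getD_map_range tRowE [] p hp

lemma tRowE_getD (p x : Nat) (hx : x < 26) :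
    (tRowE p).getD x ' '
      = alphaE.getD ((PySem.Int.mod (permE.getD ((x + p) % 26) 0 - (p : Int)) 26).toNat) ' ' := by
  unfold tRowE; exact getD_map_range _ ' ' x hx

lemma rowsE_getD (s : Int) (j : Nat) (hj : j < 26) :
    (rowsE s).getD j [] = tableE.getD ((PySem.Int.mod (s + (j : Int)) 26).toNat) [] := by
  unfold rowsE; exact getD_map_range _ [] j hj

-- the per-letter output of A at rotor position pos ≡ s + i (mod 26) is B's
-- table entry at row (s+i)%26, column ord(c)-65
lemma step_char (c : Char) (hc : c ∈ alphaE) (pos s i : Int)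
    (h : PySem.Int.mod pos 26 = PySem.Int.mod (s + i) 26) :
    alphaE.getD ((PySem.Int.mod
        (((alphaE.getD ((PySem.List.index? wiringE
            (reflE.getD ((wiringE.getD ((alphaE.getD ((PySem.Int.mod ((c.toNat : Int) - 65 + pos) 26).toNat) ' ').toNat - 65) ' ').toNat - 65) ' ')).getD 0) ' ').toNat : Int)
          - 65 - pos) 26).toNat) ' '
      = specCharE s (i, c) := by
  obtain ⟨hc1, hc2⟩ := alpha_bounds c hc
  simp only [mod26_emod] at h ⊢
  have hn : (((c.toNat : Int) - 65 + pos) % 26).toNat < 26 := by omega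
  set p : Nat := ((s + i) % 26).toNat with hp
  have hplt : p < 26 := by omega
  have hxlt : c.toNat - 65 < 26 := by omega
  simp only [specCharE, mod26_emod]
  rw [tableE_getD p hplt, tRowE_getD p (c.toNat - 65) hxlt]
  have hidx : (((c.toNat : Int) - 65 + pos) % 26).toNat = (c.toNat - 65 + p) % 26 := by omega
  obtain ⟨h1, h2, h3⟩ := perm_tab ((c.toNat - 65 + p) % 26) (Nat.mod_lt _ (by norm_num))
  rw [hidx, h1]
  simp only [mod26_emod]
  congr 2
  omega

-- folding A's step over a list equals folding it over the letters only
lemma foldl_filter_step : ∀ (cs : List Char) (st : List Char × Int),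
    cs.foldl enigmaStep st = (cs.filter (fun c => alphaE.contains c)).foldl enigmaStep st := by
  intro cs
  induction cs with
  | nil => intro st; rfl
  | cons c cs ih =>
    intro st
    rw [List.foldl_cons, ih]
    by_cases h : alphaE.contains c = true
    · rw [List.filter_cons, if_pos h, List.foldl_cons]
    · rw [List.filter_cons, if_neg h]
      congr 1
      have hf : alphaE.contains c = false := by simpa using h
      simp only [enigmaStep, hf, Bool.false_eq_true, if_false]

-- invariant of A's loop: the fold over a list of letters produces the
-- table-indexed map of the enumerated letters
lemma main_inv (s : Int) : ∀ (ls : List Char), (∀ c ∈ ls, c ∈ alphaE) →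
    ∀ (acc : List Char) (pos i : Int),
      PySem.Int.mod pos 26 = PySem.Int.mod (s + i) 26 →
      (ls.foldl enigmaStep (acc, pos)).1
        = acc ++ (PySem.List.enumerate ls i).map (specCharE s) := by
  intro ls
  induction ls with
  | nil => intro _ acc pos i _; simp [PySem.List.enumerate_nil]
  | cons c ls ih =>
    intro hall acc pos i h
    have hc : c ∈ alphaE := hall c (List.mem_cons_self ..)
    have hstep : enigmaStep (acc, pos) c
        = (acc ++ [specCharE s (i, c)], PySem.Int.mod (pos + 1) 26) := by
      simp only [enigmaStep, List.contains_iff_mem.mpr hc, if_true]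
      rw [step_char c hc pos s i h]
    have h' : PySem.Int.mod (PySem.Int.mod (pos + 1) 26) 26
        = PySem.Int.mod (s + (i + 1)) 26 := by
      simp only [mod26_emod] at h ⊢; omega
    rw [List.foldl_cons, hstep,
        ih (fun c hc => hall c (List.mem_cons_of_mem _ hc)) _ _ (i + 1) h',
        PySem.List.enumerate_cons]
    simp

-- one chunk: enumerating a block of ≤ 26 - j letters from an index ≡ j (mod 26)
-- and applying the table equals zipping the block against rows j, j+1, …
lemma blk (s : Int) : ∀ (bs : List Char) (j : Nat) (i : Int),
    (i - (j : Int)) % 26 = 0 → j + bs.length ≤ 26 → (∀ c ∈ bs, c ∈ alphaE) →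
    (PySem.List.enumerate bs i).map (specCharE s)
      = (((rowsE s).drop j).zip (bs.map (fun c => (c.toNat : Int) - 65))).map chunkLookup := by
  intro bs
  induction bs with
  | nil => intro j i _ _ _; simp [PySem.List.enumerate_nil]
  | cons c bs ih =>
    intro j i hij hlen hall
    have hj : j < 26 := by simp at hlen; omega
    have hjlen : j < (rowsE s).length := by simp [rowsE]; omega
    obtain ⟨hc1, hc2⟩ := alpha_bounds c (hall c (List.mem_cons_self ..))
    rw [PySem.List.enumerate_cons, List.map_cons,
        List.drop_eq_getElem_cons hjlen, List.map_cons, List.zip_cons_cons, List.map_cons]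
    congr 1
    · -- head: the table row used at index i is row j
      have hrow : (rowsE s)[j] = (rowsE s).getD j [] := by
        simp [List.getD, List.getElem?_eq_getElem hjlen]
      rw [hrow, rowsE_getD s j hj]
      simp only [specCharE, chunkLookup, mod26_emod]
      have h1 : ((s + i) % 26).toNat = ((s + (j : Int)) % 26).toNat := by omega
      have h2 : c.toNat - 65 = ((c.toNat : Int) - 65).toNat := by omega
      rw [h1, h2]
    · -- tail
      have := ih (j + 1) (i + 1) (by push_cast; omega)
        (by simp at hlen ⊢; omega) (fun c hc => hall c (List.mem_cons_of_mem _ hc))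
      simpa using this

lemma chunks_nil (s : Int) : enigmaChunks (rowsE s) [] = [] := by
  rw [enigmaChunks]; simp

-- full stream: the indexed map over all letters equals B's chunked zip
lemma chunks_eq (s : Int) : ∀ (n : Nat) (ls : List Char), ls.length ≤ n →
    (∀ c ∈ ls, c ∈ alphaE) → ∀ (i : Int), i % 26 = 0 →
    (PySem.List.enumerate ls i).map (specCharE s)
      = enigmaChunks (rowsE s) (ls.map (fun c => (c.toNat : Int) - 65)) := by
  intro n
  induction n with
  | zero =>
    intro ls hlen _ i _
    have : ls = [] := List.length_eq_zero_iff.mp (Nat.le_zero.mp hlen)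
    subst this
    simp [PySem.List.enumerate_nil, chunks_nil]
  | succ n ih =>
    intro ls hlen hall i hi
    by_cases hnil : ls = []
    · subst hnil; simp [PySem.List.enumerate_nil, chunks_nil]
    · have hmapnil : ls.map (fun c => (c.toNat : Int) - 65) ≠ [] := by
        simpa using hnil
      rw [enigmaChunks, dif_neg hmapnil, ← List.map_take, ← List.map_drop]
      by_cases hle : ls.length ≤ 26
      · have hdrop : ls.drop 26 = [] := List.drop_eq_nil_of_le hle
        have htake : ls.take 26 = ls := List.take_of_length_le hle
        rw [hdrop, htake, List.map_nil, chunks_nil, List.append_nil]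
        rw [blk s ls 0 i (by simpa using hi) (by omega) hall, List.drop_zero]
      · have hgt : 26 < ls.length := by omega
        conv_lhs => rw [← List.take_append_drop 26 ls]
        rw [PySem.List.enumerate_append, List.map_append]
        congr 1
        · rw [blk s (ls.take 26) 0 i (by simpa using hi)
              (by rw [List.length_take]; omega)
              (fun c hc => hall c (List.mem_of_mem_take hc)), List.drop_zero]
        · have hdlen : (ls.drop 26).length ≤ n := by
            rw [List.length_drop]; omega
          have hlt26 : (ls.take 26).length = 26 := by
            rw [List.length_take]; omega
          have hi' : ((i + ((ls.take 26).length : Int))) % 26 = 0 := by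
            rw [hlt26]; omega
          exact ih (ls.drop 26) hdlen
            (fun c hc => hall c (List.mem_of_mem_drop hc)) _ hi'

-- ===== VERDICT (by name: the statement is the Claim_ definition above) =====
theorem enigma_spec : Claim_equal_enigma := by
  intro text start_pos _
  show enigma text start_pos = enigma_alt text start_pos
  unfold enigma enigma_alt
  rw [foldl_filter_step]
  rw [main_inv start_pos _ (fun c hc => List.contains_iff_mem.mp (List.mem_filter.mp hc).2)
      [] start_pos 0 (by simp only [mod26_emod, add_zero])]
  rw [List.nil_append,
      chunks_eq start_pos _ _ le_rfl
        (fun c hc => List.contains_iff_mem.mp (List.mem_filter.mp hc).2) 0 (by norm_num)]
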